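-- pv_equiv track=rewrite | github.com/leeheejae91/AlgoPrj_Python | lv3/dividePaper2.py | solution
-- ===== SOURCE A (Python) =====
-- def solution(n):
--     answer = []
--     for i in range(n):
--         if i == 0:
--             answer.append(0)
--         else:
--             answer.append(0)
--             for j in reversed(answer[:len(answer)-1]):
--                 if j == 0:
--                     answer.append(1)
--                 else:
--                     answer.append(0)
--
--     return answer
-- ===== SOURCE B (Python) =====
-- def solution(n):
--     # Paperfolding sequence by even/odd interleaving: value at even index k is the
--     # fixed pattern (0 if k % 4 == 0 else 1), and value at odd index k equals the
--     # previous round's value at (k-1)//2 (value(2m) = value(m)); bulk slice assignments.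
--     if n <= 0:
--         return []
--     seq = [0]
--     for _ in range(n - 1):
--         out = [0] * (2 * len(seq) + 1)
--         out[2::4] = [1] * ((len(out) + 1) // 4)
--         out[1::2] = seq
--         seq = out
--     return seq
-- ===== Notes on version B (the rewrite author's own statement) =====
-- stated objective: alternative
-- what changed: Replaces A's reverse-and-complement doubling recurrence by even/odd interleaving: each round fills the even slots from a fixed alternating pattern and bulk-copies the previous sequence into the odd slots (the half-index self-similarity of the paperfolding sequence), with no reversal and no complementing.
import Mathlib
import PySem

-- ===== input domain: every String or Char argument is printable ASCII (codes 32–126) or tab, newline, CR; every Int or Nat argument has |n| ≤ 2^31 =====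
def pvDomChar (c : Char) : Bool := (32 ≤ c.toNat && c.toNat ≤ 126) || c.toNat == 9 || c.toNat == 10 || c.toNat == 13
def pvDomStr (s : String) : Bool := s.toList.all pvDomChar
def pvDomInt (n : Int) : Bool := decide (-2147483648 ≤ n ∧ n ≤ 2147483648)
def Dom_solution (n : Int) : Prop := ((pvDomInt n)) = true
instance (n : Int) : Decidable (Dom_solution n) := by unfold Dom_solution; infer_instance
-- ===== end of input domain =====

-- B replaces A's reverse-and-complement doubling recurrence by even/odd interleaving rounds
-- of the paperfolding sequence (alternative decomposition, no reversal and no complementing).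

-- ===== PORT A =====
def solution (n : Int) : List Int :=
  (PySem.List.pyRange 0 n 1).foldl (fun answer i =>
    if i == 0 then
      answer ++ [(0 : Int)]
    else
      let answer1 := answer ++ [(0 : Int)]
      (PySem.List.slice answer1 (some 0) (some ((answer1.length : Int) - 1))).reverse.foldl
        (fun acc j => if j == 0 then acc ++ [(1 : Int)] else acc ++ [(0 : Int)]) answer1) []

-- ===== PORT B =====
-- hand port of Python's extended-slice assignment `xs[start::step] = vals` (step > 0);
-- exact when vals has exactly the slice's length, which is how Source B always calls it
def assignStride (xs : List Int) (start step : Nat) (vals : List Int) : List Int :=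
  (List.range xs.length).map (fun i =>
    if start ≤ i ∧ (i - start) % step = 0 ∧ (i - start) / step < vals.length
    then vals.getD ((i - start) / step) 0 else xs.getD i 0)

def solution_alt (n : Int) : List Int :=
  if n ≤ 0 then []
  else
    (PySem.List.pyRange 0 (n - 1) 1).foldl (fun seq _ =>
      let out0 := List.replicate (2 * seq.length + 1) (0 : Int)
      let out1 := assignStride out0 2 4 (List.replicate ((out0.length + 1) / 4) 1)
      assignStride out1 1 2 seq) [(0 : Int)]

-- ===== PRECONDITION & SPEC =====
def Spec_solution (n : Int) (out : List Int) : Prop := out = solution_alt n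
instance (n : Int) (out : List Int) : Decidable (Spec_solution n out) := by unfold Spec_solution; infer_instance

-- ===== CLAIM (what is proved, stated in full; the proofs are below) =====
def Claim_equal_solution : Prop := ∀ (n : Int), Dom_solution n → Spec_solution n (solution n)

-- ===== LEMMAS AND PROOFS =====

-- odd part of a positive number (proof-side model of the 2-adic structure of indices)
def oddPart (q : Nat) : Nat :=
  if h : q % 2 = 0 ∧ 0 < q then oddPart (q / 2) else q
termination_by q
decreasing_by exact Nat.div_lt_self h.2 (by omega)

-- the complement step A applies to each mirrored element
def pvComp (x : Int) : Int := if x == 0 then 1 else 0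

-- the paperfolding value at position with 1-based index m
def pvG (m : Nat) : Int := if oddPart m % 4 = 1 then 0 else 1

-- closed form of the sequence of length 2^t - 1
def pvF (t : Nat) : List Int := (List.range (2 ^ t - 1)).map (fun k => pvG (k + 1))

-- one round of A's outer loop (for a nonzero loop counter)
def pvStep (a : List Int) : List Int := (a ++ [0]) ++ a.reverse.map pvComp

-- one round of B's loop (definitionally equal to B's loop body)
def pvStepB (seq : List Int) : List Int :=
  let out0 := List.replicate (2 * seq.length + 1) (0 : Int)
  let out1 := assignStride out0 2 4 (List.replicate ((out0.length + 1) / 4) 1)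
  assignStride out1 1 2 seq

lemma oddPart_odd {q : Nat} (h : q % 2 = 1) : oddPart q = q := by
  rw [oddPart]; simp [h]

lemma oddPart_double (b : Nat) : oddPart (2 * b) = oddPart b := by
  rcases Nat.eq_zero_or_pos b with rfl | hb
  · simp
  · rw [oddPart]
    simp [Nat.mul_div_cancel_left b (by norm_num : 0 < 2), hb]

lemma oddPart_two_pow (t : Nat) : oddPart (2 ^ t) = 1 := by
  induction t with
  | zero => rw [oddPart]; simp
  | succ t ih => rw [pow_succ, mul_comm, oddPart_double]; exact ih

lemma pvComp_pvG (m : Nat) : pvComp (pvG m) = 1 - pvG m := by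
  unfold pvG pvComp; split <;> simp

lemma pvG_double (m : Nat) : pvG (2 * m) = pvG m := by
  unfold pvG; rw [oddPart_double]

lemma pvG_reflect : ∀ a t, 1 ≤ a → a < 2 ^ t → pvG (2 ^ (t + 1) - a) = 1 - pvG a := by
  intro a
  induction a using Nat.strong_induction_on with
  | _ a ih =>
    intro t h1 h2
    have ht : 1 ≤ t := by
      by_contra h
      have : t = 0 := by omega
      subst this; simp at h2; omega
    have hM : 2 ^ (t + 1) = 2 * 2 ^ t := by rw [pow_succ]; ring
    rcases Nat.mod_two_eq_zero_or_one a with he | ho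
    · -- a even: divide both sides by 2 and use the induction hypothesis at t - 1
      set a2 := a / 2 with ha2
      have haa : a = 2 * a2 := by omega
      have h1' : 1 ≤ a2 := by omega
      have hpt : 2 * 2 ^ (t - 1) = 2 ^ t := by
        rw [← pow_succ']
        congr 1
        omega
      have h2' : a2 < 2 ^ (t - 1) := by omega
      have hih := ih a2 (by omega) (t - 1) h1' h2'
      rw [show (t - 1) + 1 = t by omega] at hih
      have hsub : 2 ^ (t + 1) - a = 2 * (2 ^ t - a2) := by omega
      unfold pvG at hih ⊢
      rw [hsub, haa, oddPart_double, oddPart_double]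
      exact hih
    · -- a odd: both odd parts are the numbers themselves, compare residues mod 4
      have h4 : 2 ^ (t + 1) % 4 = 0 := by
        have : (4 : Nat) ∣ 2 ^ (t + 1) := by
          have h := pow_dvd_pow 2 (show 2 ≤ t + 1 by omega)
          simpa using h
        omega
      have hle : a ≤ 2 ^ (t + 1) := by omega
      have hodd : (2 ^ (t + 1) - a) % 2 = 1 := by omega
      unfold pvG
      rw [oddPart_odd hodd, oddPart_odd ho]
      split_ifs <;> omega

-- ----- A's loop computes iterated pvStep -----

lemma pvStep_pvF (t : Nat) : pvStep (pvF t) = pvF (t + 1) := by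
  have hN : 2 ^ (t + 1) - 1 = (2 ^ t - 1 + 1) + (2 ^ t - 1) := by
    have h1 : 1 ≤ 2 ^ t := Nat.one_le_two_pow
    have : 2 ^ (t + 1) = 2 * 2 ^ t := by rw [pow_succ]; ring
    omega
  set N := 2 ^ t - 1 with hNdef
  have h1 : 1 ≤ 2 ^ t := Nat.one_le_two_pow
  unfold pvF pvStep
  rw [hN, List.range_add, List.range_succ]
  simp only [List.map_append, List.map_map, List.map_cons, List.map_nil]
  have hmid : pvG (N + 1) = 0 := by
    unfold pvG
    rw [show N + 1 = 2 ^ t by omega, oddPart_two_pow]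
    norm_num
  rw [hmid]
  have htail : (List.map (fun k => pvG (k + 1)) (List.range N)).reverse.map pvComp
      = List.map ((fun k => pvG (k + 1)) ∘ fun x => N + 1 + x) (List.range N) := by
    apply List.ext_getElem
    · simp
    · intro j hj1 hj2
      simp only [List.length_map, List.length_reverse, List.length_range] at hj1 hj2
      simp only [List.getElem_map, List.getElem_reverse, List.length_map, List.length_range,
        List.getElem_range, Function.comp]
      have hval : pvG (N + 1 + j + 1) = 1 - pvG (N - 1 - j + 1) := by
        have ha1 : 1 ≤ N - 1 - j + 1 := by omega
        have ha2 : N - 1 - j + 1 < 2 ^ t := by omega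
        have hr := pvG_reflect (N - 1 - j + 1) t ha1 ha2
        rw [show 2 ^ (t + 1) - (N - 1 - j + 1) = N + 1 + j + 1 by omega] at hr
        exact hr
      rw [pvComp_pvG, hval]
  rw [htail]

lemma pvIter_pvF (t : Nat) : pvStep^[t] [] = pvF t := by
  induction t with
  | zero => simp [pvF]
  | succ t ih => rw [Function.iterate_succ_apply', ih, pvStep_pvF]

-- A's inner loop appends the complement of each element it reads
lemma inner_fold (l : List Int) (init : List Int) :
    l.foldl (fun acc j => if j == 0 then acc ++ [(1 : Int)] else acc ++ [(0 : Int)]) init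
      = init ++ l.map pvComp := by
  have hfun : (fun acc j => if j == 0 then acc ++ [(1 : Int)] else acc ++ [(0 : Int)])
      = fun (acc : List Int) (j : Int) => acc ++ [pvComp j] := by
    funext acc j; unfold pvComp; split <;> rfl
  rw [hfun, PySem.List.foldl_append_singleton_eq_map]

-- one round of A's loop body for a nonzero counter is pvStep
lemma body_eq_step (a : List Int) (i : Int) (hi : ¬ i = 0) :
    (if i == 0 then
      a ++ [(0 : Int)]
    else
      let answer1 := a ++ [(0 : Int)]
      (PySem.List.slice answer1 (some 0) (some ((answer1.length : Int) - 1))).reverse.foldl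
        (fun acc j => if j == 0 then acc ++ [(1 : Int)] else acc ++ [(0 : Int)]) answer1)
      = pvStep a := by
  rw [if_neg (by simpa using hi)]
  show (PySem.List.slice (a ++ [(0 : Int)]) (some 0) (some (((a ++ [(0 : Int)]).length : Int) - 1))).reverse.foldl
        (fun acc j => if j == 0 then acc ++ [(1 : Int)] else acc ++ [(0 : Int)]) (a ++ [(0 : Int)]) = pvStep a
  have hlen : ((a ++ [(0 : Int)]).length : Int) - 1 = (a.length : Int) := by
    simp
  rw [hlen, PySem.List.slice_zero_start, PySem.List.slice_to _ (by positivity),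
    Int.toNat_natCast, List.take_left, inner_fold]
  rfl

-- A's fold over the counters m, m+1, …, n-1 (all nonzero when 1 ≤ m) iterates pvStep
lemma fold_tail (n : Int) : ∀ (m : Int), 1 ≤ m → ∀ (a : List Int),
    (PySem.List.pyRange m n 1).foldl (fun answer i =>
      if i == 0 then
        answer ++ [(0 : Int)]
      else
        let answer1 := answer ++ [(0 : Int)]
        (PySem.List.slice answer1 (some 0) (some ((answer1.length : Int) - 1))).reverse.foldl
          (fun acc j => if j == 0 then acc ++ [(1 : Int)] else acc ++ [(0 : Int)]) answer1) a
      = pvStep^[(n - m).toNat] a := by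
  intro m
  generalize hk : (n - m).toNat = k
  induction k generalizing m with
  | zero =>
    intro _ a
    rw [PySem.List.pyRange_one_eq_nil (by omega)]
    simp
  | succ k ih =>
    intro hm a
    rw [PySem.List.pyRange_one_cons (by omega), List.foldl_cons,
      body_eq_step a m (by omega), ih (m + 1) (by omega) (by omega)]
    rw [Function.iterate_succ_apply]

lemma solution_eq_iter (n : Int) : solution n = pvStep^[n.toNat] [] := by
  unfold solution
  by_cases h : n ≤ 0
  · rw [PySem.List.pyRange_one_eq_nil (by omega)]
    simp [Int.toNat_of_nonpos h]
  · rw [PySem.List.pyRange_one_cons (by omega)]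
    simp only [List.foldl_cons, show ((0 : Int) == 0) = true from rfl, if_true, List.nil_append,
      zero_add]
    rw [fold_tail n 1 (by omega), show [(0 : Int)] = pvStep [] from rfl,
      ← Function.iterate_succ_apply]
    congr 1
    omega

-- ----- B's loop computes iterated pvStepB -----

lemma length_assignStride (xs : List Int) (s st : Nat) (v : List Int) :
    (assignStride xs s st v).length = xs.length := by
  simp [assignStride]

lemma assignStride_getD (xs : List Int) (s st : Nat) (v : List Int) (i : Nat)
    (hi : i < xs.length) :
    (assignStride xs s st v).getD i 0 =
      if s ≤ i ∧ (i - s) % st = 0 ∧ (i - s) / st < v.length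
      then v.getD ((i - s) / st) 0 else xs.getD i 0 := by
  unfold assignStride
  rw [List.getD_eq_getElem _ _ (by simpa using hi)]
  simp

lemma pvF_length (t : Nat) : (pvF t).length = 2 ^ t - 1 := by
  simp [pvF]

lemma pvF_getD (t i : Nat) (hi : i < 2 ^ t - 1) : (pvF t).getD i 0 = pvG (i + 1) := by
  unfold pvF
  rw [List.getD_eq_getElem _ _ (by simpa using hi)]
  simp

lemma pvStepB_pvF (t : Nat) : pvStepB (pvF t) = pvF (t + 1) := by
  have h1 : 1 ≤ 2 ^ t := Nat.one_le_two_pow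
  have hpow : 2 ^ (t + 1) = 2 * 2 ^ t := by rw [pow_succ]; ring
  unfold pvStepB
  simp only [List.length_replicate, pvF_length]
  apply List.ext_getElem
  · simp [length_assignStride, pvF_length]
    omega
  · intro i hi hi2
    rw [length_assignStride, length_assignStride, List.length_replicate] at hi
    rw [pvF_length] at hi2
    rw [← List.getD_eq_getElem _ 0 (by
        rw [length_assignStride, length_assignStride, List.length_replicate]; exact hi),
      ← List.getD_eq_getElem _ 0 (by rw [pvF_length]; exact hi2)]
    rw [pvF_getD _ _ hi2]
    rw [assignStride_getD _ _ _ _ _ (by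
      rw [length_assignStride, List.length_replicate]; exact hi)]
    simp only [pvF_length]
    by_cases hodd : i % 2 = 1
    · rw [if_pos (by omega)]
      rw [pvF_getD _ _ (by omega)]
      rw [show i + 1 = 2 * ((i - 1) / 2 + 1) by omega, pvG_double]
    · rw [if_neg (by omega)]
      rw [assignStride_getD _ _ _ _ _ (by rw [List.length_replicate]; exact hi)]
      simp only [List.length_replicate]
      by_cases h2 : i % 4 = 2
      · rw [if_pos (by omega)]
        rw [List.getD_replicate _ (by omega)]
        unfold pvG
        rw [oddPart_odd (by omega), if_neg (by omega)]
      · rw [if_neg (by omega)]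
        rw [List.getD_replicate _ (by omega)]
        unfold pvG
        rw [oddPart_odd (by omega), if_pos (by omega)]

lemma foldl_const_iterate {α β : Type} (h : α → α) :
    ∀ (l : List β) (a : α), l.foldl (fun x _ => h x) a = h^[l.length] a := by
  intro l
  induction l with
  | nil => intro a; simp
  | cons x xs ih =>
    intro a
    rw [List.foldl_cons, ih, List.length_cons, Function.iterate_succ_apply]

lemma pvIterB_pvF (t : Nat) : pvStepB^[t] (pvF 1) = pvF (t + 1) := by
  induction t with
  | zero => simp
  | succ t ih => rw [Function.iterate_succ_apply', ih, pvStepB_pvF]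

lemma pvF_one : pvF 1 = [(0 : Int)] := by
  unfold pvF
  simp only [pow_one, List.range_succ]
  norm_num
  unfold pvG
  rw [oddPart_odd (by norm_num)]
  norm_num

lemma solution_alt_eq_pvF (n : Int) : solution_alt n = pvF n.toNat := by
  unfold solution_alt
  by_cases h : n ≤ 0
  · rw [if_pos h, Int.toNat_of_nonpos h]
    simp [pvF]
  · rw [if_neg h]
    show List.foldl (fun seq _ => pvStepB seq) [(0 : Int)] (PySem.List.pyRange 0 (n - 1) 1)
      = pvF n.toNat
    rw [foldl_const_iterate pvStepB, PySem.List.length_pyRange_one, ← pvF_one, pvIterB_pvF]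
    congr 1
    omega

-- ===== VERDICT (by name: the statement is the Claim_ definition above) =====
theorem solution_spec : Claim_equal_solution := by
  intro n _
  unfold Spec_solution
  rw [solution_eq_iter, solution_alt_eq_pvF, pvIter_pvF]
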